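-- pv_equiv track=rewrite | github.com/vladkostikov/HSP | 1.3.2.2-8_tasks/white_walkers.py | white_walkers
-- ===== SOURCE A (Python) =====
-- def white_walkers(village: str) -> bool:
--     digits = []
--     for num in range(0, 10):
--         digits.append(str(num))
--
--     second_cityzen_index = None
--     is_walkers_identified = False
--     for i, char in enumerate(village):
--         if char not in digits:
--             continue
--
--         if second_cityzen_index is None:
--             second_cityzen_index = i
--             continue
--
--         first_cityzen_index = second_cityzen_index
--         second_cityzen_index = i
--         sum_of_two_citizens = int(village[first_cityzen_index]) + int(village[second_cityzen_index])
--         if sum_of_two_citizens == 10: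
--             white_walkers_between_cityzens = village[first_cityzen_index + 1:second_cityzen_index].count("=")
--             if white_walkers_between_cityzens != 3:
--                 return False
--             is_walkers_identified = True
--     return is_walkers_identified
-- ===== SOURCE B (Python) =====
-- def white_walkers(village: str) -> bool:
--     last = None   # value of the most recent digit, or None
--     eqs = 0       # number of '=' seen since that digit
--     found = False
--     for c in village:
--         if "0" <= c <= "9":
--             if last is not None and last + int(c) == 10:
--                 if eqs != 3:
--                     return False
--                 found = True
--             last = int(c)
--             eqs = 0
--         elif c == "=":
--             eqs += 1
--     return found
-- ===== Notes on version B (the rewrite author's own statement) =====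
-- stated objective: faster
-- what changed: Replaces A's stored previous-digit index with a per-pair slice-and-count of the separator characters by an index-free single pass that carries the last digit's value and an incrementally maintained separator counter, so no indices, slices or substring counts are ever taken.
import Mathlib
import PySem

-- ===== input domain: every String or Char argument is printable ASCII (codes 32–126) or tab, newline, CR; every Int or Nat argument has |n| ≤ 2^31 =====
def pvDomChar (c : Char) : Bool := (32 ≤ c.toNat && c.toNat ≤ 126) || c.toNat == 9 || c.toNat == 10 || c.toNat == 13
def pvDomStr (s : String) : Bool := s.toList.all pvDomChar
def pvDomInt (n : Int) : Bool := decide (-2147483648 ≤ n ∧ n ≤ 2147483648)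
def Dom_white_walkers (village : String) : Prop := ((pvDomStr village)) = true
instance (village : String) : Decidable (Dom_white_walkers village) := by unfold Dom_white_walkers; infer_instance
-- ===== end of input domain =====

-- B replaces A's previous-digit-index tracker with per-pair slicing/counting by an index-free
-- single pass carrying the last digit's value and an incremental separator counter (objective: faster, measured).


-- ===== PORT A =====
-- digits = [str(num) for num in range(0, 10)] built by append, as in A
def wwDigitsA : List String := (PySem.List.pyRange 0 10 1).foldl (fun acc n => acc ++ [PySem.Int.toStr n]) []

-- int(village[a]) + int(village[b]); the pyGet?/ofStr? defaults only make it total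
def wwSum (cs : List Char) (a b : Int) : Int :=
  (PySem.Int.ofStr? (String.ofList [((PySem.List.pyGet? cs a).getD ' ')])).getD 0 +
  (PySem.Int.ofStr? (String.ofList [((PySem.List.pyGet? cs b).getD ' ')])).getD 0

-- village[a+1:b].count("=")  (single-character needle, exact)
def wwCnt (cs : List Char) (a b : Int) : Nat :=
  PySem.Chars.count (PySem.List.slice cs (some (a + 1)) (some b)) ['=']

-- A's enumerate loop: state = (second_cityzen_index, is_walkers_identified); `return False` = value false
def wwLoopA (cs : List Char) : List (Int × Char) → Option Int → Bool → Bool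
  | [], _, flag => flag
  | (i, ch) :: rest, prev, flag =>
    if ¬ (wwDigitsA.contains (String.ofList [ch])) then wwLoopA cs rest prev flag
    else
      match prev with
      | none => wwLoopA cs rest (some i) flag
      | some first =>
        if wwSum cs first i = 10 then
          if wwCnt cs first i ≠ 3 then false
          else wwLoopA cs rest (some i) true
        else wwLoopA cs rest (some i) flag

def white_walkers (village : String) : Bool :=
  wwLoopA village.toList (PySem.List.enumerate village.toList 0) none false

-- ===== PORT B =====
-- int(c) for the single character B holds in hand
def wwVal (c : Char) : Int := (PySem.Int.ofStr? (String.ofList [c])).getD 0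

-- B's single pass: last = value of the most recent digit, eqs = '='-count since it, found flag
def wwLoopB : List Char → Option Int → Nat → Bool → Bool
  | [], _, _, found => found
  | c :: rest, last, eqs, found =>
    if '0' ≤ c ∧ c ≤ '9' then
      match last with
      | some v =>
        if v + wwVal c = 10 then
          if eqs ≠ 3 then false
          else wwLoopB rest (some (wwVal c)) 0 true
        else wwLoopB rest (some (wwVal c)) 0 found
      | none => wwLoopB rest (some (wwVal c)) 0 found
    else if c = '=' then wwLoopB rest last (eqs + 1) found
    else wwLoopB rest last eqs found

def white_walkers_alt (village : String) : Bool :=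
  wwLoopB village.toList none 0 false

-- ===== PRECONDITION & SPEC =====
def Spec_white_walkers (village : String) (out : Bool) : Prop := out = white_walkers_alt village
instance (village : String) (out : Bool) : Decidable (Spec_white_walkers village out) := by unfold Spec_white_walkers; infer_instance

-- ===== CLAIM (what is proved, stated in full; the proofs are below) =====
def Claim_equal_white_walkers : Prop := ∀ (village : String), Dom_white_walkers village → Spec_white_walkers village (white_walkers village)

-- ===== LEMMAS AND PROOFS =====

theorem wwCharEq (c d : Char) (h : c.toNat = d.toNat) : c = d := Char.ext (UInt32.toNat_inj.mp h)

-- A's string-list digit test agrees with B's character range test.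
theorem wwDigit_bridge (c : Char) :
    wwDigitsA.contains (String.ofList [c]) = decide ('0' ≤ c ∧ c ≤ '9') := by
  have hd : wwDigitsA = ['0','1','2','3','4','5','6','7','8','9'].map (fun d => String.ofList [d]) := by decide
  have hinj : ∀ d : Char, (String.ofList [c] == String.ofList [d]) = (c == d) := by
    intro d
    by_cases hcd : c = d
    · subst hcd; simp
    · have hne : ¬ String.ofList [c] = String.ofList [d] := by
        intro h'; exact hcd (by simpa using congrArg String.toList h')
      simp [hcd, hne]
  rw [hd, List.contains_eq_any_beq, List.any_map]
  simp only [Function.comp_def, hinj]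
  rw [Bool.eq_iff_iff]
  simp only [List.any_cons, List.any_nil, Bool.or_eq_true, Bool.or_false, beq_iff_eq, decide_eq_true_eq]
  constructor
  · rintro (rfl|rfl|rfl|rfl|rfl|rfl|rfl|rfl|rfl|rfl) <;> exact ⟨by decide, by decide⟩
  · rintro ⟨h1, h2⟩
    rw [Char.le_def, UInt32.le_iff_toNat_le] at h1 h2
    have h0 : ('0':Char).val.toNat = 48 := by decide
    have h9 : ('9':Char).val.toNat = 57 := by decide
    rw [h0] at h1; rw [h9] at h2
    have hc : c.val.toNat = 48 ∨ c.val.toNat = 49 ∨ c.val.toNat = 50 ∨ c.val.toNat = 51 ∨ c.val.toNat = 52 ∨ c.val.toNat = 53 ∨ c.val.toNat = 54 ∨ c.val.toNat = 55 ∨ c.val.toNat = 56 ∨ c.val.toNat = 57 := by omega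
    rcases hc with h|h|h|h|h|h|h|h|h|h
    · simp [wwCharEq c '0' (by simp [Char.toNat, h])]
    · simp [wwCharEq c '1' (by simp [Char.toNat, h])]
    · simp [wwCharEq c '2' (by simp [Char.toNat, h])]
    · simp [wwCharEq c '3' (by simp [Char.toNat, h])]
    · simp [wwCharEq c '4' (by simp [Char.toNat, h])]
    · simp [wwCharEq c '5' (by simp [Char.toNat, h])]
    · simp [wwCharEq c '6' (by simp [Char.toNat, h])]
    · simp [wwCharEq c '7' (by simp [Char.toNat, h])]
    · simp [wwCharEq c '8' (by simp [Char.toNat, h])]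
    · simp [wwCharEq c '9' (by simp [Char.toNat, h])]

-- a cons suffix of cs pins the element and the next suffix
theorem wwDropCons (cs : List Char) (k : Nat) (c : Char) (rest : List Char)
    (h : cs.drop k = c :: rest) : cs[k]? = some c ∧ cs.drop (k+1) = rest := by
  constructor
  · have h2 := (List.getElem?_drop (xs := cs) (i := k) (j := 0)).symm
    simp only [h] at h2; simpa using h2
  · have h3 : cs.drop (k+1) = (cs.drop k).drop 1 := by rw [List.drop_drop]
    simp [h3, h]

-- Chars.count with the single-character needle "=" is List.count '='
theorem wwGoSingle (fuel : Nat) : ∀ (l : List Char) (acc : Nat), l.length ≤ fuel →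
    PySem.Chars.count.go ['='] fuel l acc = acc + l.count '=' := by
  induction fuel with
  | zero =>
    intro l acc h
    cases l with
    | nil => simp [PySem.Chars.count.go]
    | cons a t => simp at h
  | succ f ih =>
    intro l acc h
    cases l with
    | nil => simp [PySem.Chars.count.go]
    | cons a t =>
      by_cases ha : a = '='
      · subst ha
        rw [show PySem.Chars.count.go ['='] (f+1) ('=' :: t) acc = PySem.Chars.count.go ['='] f t (acc+1) from by
          simp [PySem.Chars.count.go, List.isPrefixOf]]
        rw [ih t (acc+1) (by simpa using h)]
        simp; omega
      · rw [show PySem.Chars.count.go ['='] (f+1) (a :: t) acc = PySem.Chars.count.go ['='] f t acc from by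
          simp [PySem.Chars.count.go, List.isPrefixOf, Ne.symm ha]]
        rw [ih t acc (by simpa using h)]
        simp [ha]

theorem wwCount_single (l : List Char) : PySem.Chars.count l ['='] = l.count '=' := by
  simp [PySem.Chars.count]
  simpa using wwGoSingle l.length l 0 le_rfl

-- the counter starts at 0 right after a digit: village[k+1:k+1] has no '='
theorem wwCnt_self (cs : List Char) (k : Nat) : wwCnt cs (k : Int) ((k : Int) + 1) = 0 := by
  unfold wwCnt
  rw [show ((k : Int) + 1) = ((k+1 : Nat) : Int) from by push_cast; ring]
  rw [PySem.List.slice_natCast]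
  simp [wwCount_single]

-- extending the window by one non-slice character adds its own '='-count
theorem wwCnt_step (cs : List Char) (a k : Nat) (c : Char) (hak : a < k) (hc : cs[k]? = some c) :
    wwCnt cs (a : Int) ((k : Int) + 1) = wwCnt cs (a : Int) (k : Int) + (if c = '=' then 1 else 0) := by
  unfold wwCnt
  rw [show ((a : Int) + 1) = ((a+1 : Nat) : Int) from by push_cast; ring,
      show ((k : Int) + 1) = ((k+1 : Nat) : Int) from by push_cast; ring]
  rw [PySem.List.slice_natCast, PySem.List.slice_natCast]
  rw [wwCount_single, wwCount_single]
  have hk : k < cs.length := by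
    by_contra hh
    rw [List.getElem?_eq_none (by omega)] at hc
    simp at hc
  have h1 : k + 1 - (a + 1) = (k - (a+1)) + 1 := by omega
  rw [h1, List.take_add_one]
  have h2 : (cs.drop (a+1))[k - (a+1)]? = some c := by
    rw [List.getElem?_drop]
    rw [show a + 1 + (k - (a+1)) = k from by omega]
    exact hc
  rw [h2]
  simp [List.count_append]
  by_cases hce : c = '=' <;> simp [hce]

-- wwSum at two in-range positions is the sum of the per-character values
theorem wwSum_eq (cs : List Char) (a k : Nat) (ca c : Char)
    (ha : cs[a]? = some ca) (hk : cs[k]? = some c) :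
    wwSum cs (a : Int) (k : Int) = wwVal ca + wwVal c := by
  unfold wwSum wwVal
  rw [PySem.List.pyGet?_natCast, PySem.List.pyGet?_natCast, ha, hk]
  rfl

-- link between A's loop state and B's: either both before the first digit, or prev is a digit
-- position a with B holding its value and the running '='-count of village[a+1:k]
def wwRel (cs : List Char) (k : Nat) (prev : Option Int) (last : Option Int) (eqs : Nat) : Prop :=
  (prev = none ∧ last = none) ∨
  ∃ (a : Nat) (ca : Char), a < k ∧ cs[a]? = some ca ∧ ('0' ≤ ca ∧ ca ≤ '9') ∧
    prev = some (a : Int) ∧ last = some (wwVal ca) ∧ eqs = wwCnt cs (a : Int) (k : Int)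

-- main invariant: on the suffix cs.drop k the two loops agree
theorem wwMain (cs : List Char) : ∀ (l : List Char) (k : Nat), l = cs.drop k →
    ∀ (prev last : Option Int) (eqs : Nat) (flag : Bool), wwRel cs k prev last eqs →
    wwLoopA cs (PySem.List.enumerate l (k : Int)) prev flag = wwLoopB l last eqs flag := by
  intro l
  induction l with
  | nil => intro k _ prev last eqs flag _; rfl
  | cons c rest ih =>
    intro k hdrop prev last eqs flag hrel
    obtain ⟨hck, hrest⟩ := wwDropCons cs k c rest hdrop.symm
    rw [PySem.List.enumerate_cons]
    have hcast : (k : Int) + 1 = ((k+1 : Nat) : Int) := by push_cast; ring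
    simp only [wwLoopA, wwLoopB]
    by_cases hdig : '0' ≤ c ∧ c ≤ '9'
    · have hAcond : ¬¬(wwDigitsA.contains (String.ofList [c]) = true) := by
        rw [wwDigit_bridge c]; simp [hdig]
      rw [if_neg hAcond, if_pos hdig]
      have hrel' : wwRel cs (k+1) (some (k : Int)) (some (wwVal c)) 0 :=
        Or.inr ⟨k, c, Nat.lt_succ_self k, hck, hdig, rfl, rfl, (wwCnt_self cs k).symm⟩
      rcases hrel with ⟨hp, hl⟩ | ⟨a, ca, hak, hca, hcad, hp, hl, he⟩
      · subst hp; subst hl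
        rw [hcast]
        exact ih (k+1) hrest.symm _ _ _ flag hrel'
      · subst hp; subst hl; subst he
        show (if wwSum cs (a : Int) (k : Int) = 10 then
                (if wwCnt cs (a : Int) (k : Int) ≠ 3 then false
                 else wwLoopA cs (PySem.List.enumerate rest ((k : Int)+1)) (some (k : Int)) true)
              else wwLoopA cs (PySem.List.enumerate rest ((k : Int)+1)) (some (k : Int)) flag)
            = (if wwVal ca + wwVal c = 10 then
                (if wwCnt cs (a : Int) (k : Int) ≠ 3 then false
                 else wwLoopB rest (some (wwVal c)) 0 true)
              else wwLoopB rest (some (wwVal c)) 0 flag)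
        rw [wwSum_eq cs a k ca c hca hck, hcast]
        split_ifs with h10 h3
        · rfl
        · exact ih (k+1) hrest.symm _ _ _ true hrel'
        · exact ih (k+1) hrest.symm _ _ _ flag hrel'
    · have hAcond : ¬(wwDigitsA.contains (String.ofList [c]) = true) := by
        rw [wwDigit_bridge c]; simp [hdig]
      rw [if_pos hAcond, if_neg hdig, hcast]
      rcases hrel with ⟨hp, hl⟩ | ⟨a, ca, hak, hca, hcad, hp, hl, he⟩
      · subst hp; subst hl
        by_cases hce : c = '='
        · rw [if_pos hce]
          exact ih (k+1) hrest.symm _ _ _ flag (Or.inl ⟨rfl, rfl⟩)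
        · rw [if_neg hce]
          exact ih (k+1) hrest.symm _ _ _ flag (Or.inl ⟨rfl, rfl⟩)
      · subst hp; subst hl; subst he
        have hstep := wwCnt_step cs a k c hak hck
        by_cases hce : c = '='
        · rw [if_pos hce]
          refine ih (k+1) hrest.symm _ _ _ flag (Or.inr ⟨a, ca, by omega, hca, hcad, rfl, rfl, ?_⟩)
          rw [← hcast, hstep, if_pos hce]
        · rw [if_neg hce]
          refine ih (k+1) hrest.symm _ _ _ flag (Or.inr ⟨a, ca, by omega, hca, hcad, rfl, rfl, ?_⟩)
          rw [← hcast, hstep, if_neg hce]; ring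

-- ===== VERDICT (by name: the statement is the Claim_ definition above) =====
theorem white_walkers_spec : Claim_equal_white_walkers := by
  intro village _
  unfold Spec_white_walkers white_walkers white_walkers_alt
  exact wwMain village.toList village.toList 0 (by simp) none none 0 false (Or.inl ⟨rfl, rfl⟩)
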